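-- pv_equiv track=rewrite | github.com/Kurone014/Segment-CDP-Pipeline-Project | cdp_pipeline_fixed.py | _detect_behavioral_patterns
-- ===== SOURCE A (Python) =====
-- def _detect_behavioral_patterns(events):
--     """ENHANCED: Better pattern detection"""
--     patterns = []
--
--     # Engagement level based on event count
--     if len(events) > 15:
--         patterns.append('highly_engaged')
--     elif len(events) > 8:
--         patterns.append('engaged')
--     elif len(events) > 4:
--         patterns.append('exploring')
--
--     # Analyze event types
--     event_types = [e.get('event', '') for e in events]
--
--     # Research behavior
--     research_events = ['docs_view', 'faq_view', 'api_docs', 'technical_specs', 'download_whitepaper']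
--     research_count = sum(1 for e in event_types if e in research_events)
--
--     if research_count >= 3:
--         patterns.append('researcher')
--
--     # Action-oriented behavior
--     action_events = ['form_start', 'form_complete', 'add_to_cart', 'checkout_start', 'demo_request']
--     action_count = sum(1 for e in event_types if e in action_events)
--
--     if action_count >= 2:
--         patterns.append('action_oriented')
--
--     # Technical evaluator
--     technical_events = ['api_docs', 'technical_specs', 'integration_guide', 'docs_view']
--     technical_count = sum(1 for e in event_types if e in technical_events)
--
--     if technical_count >= 2:
--         patterns.append('technical_evaluator')
--
--     # Comparison shopper
--     comparison_events = ['competitor_comparison', 'vs_page', 'calculator']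
--     comparison_count = sum(1 for e in event_types if e in comparison_events)
--
--     if comparison_count >= 2:
--         patterns.append('comparison_shopper')
--
--     # Price sensitivity
--     pricing_count = sum(1 for e in events if 'pricing' in str(e).lower())
--     if pricing_count >= 2:
--         patterns.append('price_sensitive')
--
--     return patterns
-- ===== SOURCE B (Python) =====
-- def _detect_behavioral_patterns(events):
--     """One pass over events builds an event-type counter, a pricing counter and the
--     length; the category counts are then derived by table lookups from the counter."""
--     RESEARCH = ['docs_view', 'faq_view', 'api_docs', 'technical_specs', 'download_whitepaper']
--     ACTION = ['form_start', 'form_complete', 'add_to_cart', 'checkout_start', 'demo_request']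
--     TECHNICAL = ['api_docs', 'technical_specs', 'integration_guide', 'docs_view']
--     COMPARISON = ['competitor_comparison', 'vs_page', 'calculator']
--
--     n = 0
--     counts = {}
--     pricing = 0
--     for e in events:
--         n += 1
--         t = e.get('event', '')
--         counts[t] = counts.get(t, 0) + 1
--         if 'pricing' in str(e).lower():
--             pricing += 1
--
--     patterns = []
--     if n > 15:
--         patterns.append('highly_engaged')
--     elif n > 8:
--         patterns.append('engaged')
--     elif n > 4:
--         patterns.append('exploring')
--     if sum(counts.get(t, 0) for t in RESEARCH) >= 3:
--         patterns.append('researcher')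
--     if sum(counts.get(t, 0) for t in ACTION) >= 2:
--         patterns.append('action_oriented')
--     if sum(counts.get(t, 0) for t in TECHNICAL) >= 2:
--         patterns.append('technical_evaluator')
--     if sum(counts.get(t, 0) for t in COMPARISON) >= 2:
--         patterns.append('comparison_shopper')
--     if pricing >= 2:
--         patterns.append('price_sensitive')
--     return patterns
-- ===== Notes on version B (the rewrite author's own statement) =====
-- stated objective: alternative
-- what changed: A repeatedly scans the event list (one membership-test comprehension per category plus a separate pricing scan); B makes a single pass building a type counter, a pricing count and the length, then derives each category count by summing counter lookups over the fixed category tables.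
import Mathlib
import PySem

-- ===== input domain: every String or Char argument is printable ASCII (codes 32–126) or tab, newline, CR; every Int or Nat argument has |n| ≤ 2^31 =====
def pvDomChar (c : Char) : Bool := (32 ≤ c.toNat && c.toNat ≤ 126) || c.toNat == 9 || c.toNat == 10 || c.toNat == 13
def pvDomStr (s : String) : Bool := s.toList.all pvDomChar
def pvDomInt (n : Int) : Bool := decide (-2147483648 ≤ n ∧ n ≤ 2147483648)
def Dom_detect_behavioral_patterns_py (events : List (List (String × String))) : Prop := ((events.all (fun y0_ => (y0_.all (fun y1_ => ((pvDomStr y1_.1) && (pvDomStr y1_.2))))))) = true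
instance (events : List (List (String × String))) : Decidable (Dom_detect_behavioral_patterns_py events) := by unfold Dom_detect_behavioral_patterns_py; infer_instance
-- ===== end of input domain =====

-- B replaces A's five separate scans of the event list by one counting pass plus
-- table lookups over the fixed category lists (objective: alternative decomposition).

-- Shared input-conversion helpers: each event arrives as an association list and is the
-- Python dict built from it (dict(pairs): last value wins, first position kept), so both
-- ports read it through PySem.Dict.ofList.

-- Python repr of a str — hand port, exact on the Dom charset (printable ASCII + tab/newline/CR):
-- single quotes unless the string contains ' and not "; backslash, the quote char and
-- tab/newline/CR are escaped; all other Dom characters are printable and kept as-is.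
def pyReprStr (s : String) : String :=
  let cs := s.toList
  let q : Char := if cs.contains '\'' && !cs.contains '"' then '"' else '\''
  String.mk (q :: (cs.flatMap (fun c =>
    if c = '\\' then ['\\', '\\']
    else if c = q then ['\\', q]
    else if c = '\t' then ['\\', 't']
    else if c = '\n' then ['\\', 'n']
    else if c = '\r' then ['\\', 'r']
    else [c])) ++ [q])

-- Python str(d) for a dict of strings, given its items in order — hand port, exact on Dom.
def pyStrDict (e : List (String × String)) : String :=
  let items := (PySem.Dict.ofList e).items
  if items.isEmpty then "{}"
  else "{" ++ PySem.Str.join ", " (items.map (fun kv => pyReprStr kv.1 ++ ": " ++ pyReprStr kv.2)) ++ "}"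

-- e.get('event', '')
def pyGetEventType (e : List (String × String)) : String :=
  (PySem.Dict.ofList e).getD "event" ""

-- 'pricing' in str(e).lower()
def pricingHit (e : List (String × String)) : Bool :=
  PySem.Str.isIn "pricing" (PySem.Str.lower (pyStrDict e))

-- ===== PORT A =====
def detect_behavioral_patterns_py (events : List (List (String × String))) : List String :=
  let patterns : List String := []
  let patterns :=
    if (events.length : Int) > 15 then patterns ++ ["highly_engaged"]
    else if (events.length : Int) > 8 then patterns ++ ["engaged"]
    else if (events.length : Int) > 4 then patterns ++ ["exploring"]
    else patterns
  let event_types := events.map pyGetEventType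
  let research_events := ["docs_view", "faq_view", "api_docs", "technical_specs", "download_whitepaper"]
  let research_count : Int := event_types.foldl (fun acc e => if research_events.contains e then acc + 1 else acc) 0
  let patterns := if research_count ≥ 3 then patterns ++ ["researcher"] else patterns
  let action_events := ["form_start", "form_complete", "add_to_cart", "checkout_start", "demo_request"]
  let action_count : Int := event_types.foldl (fun acc e => if action_events.contains e then acc + 1 else acc) 0
  let patterns := if action_count ≥ 2 then patterns ++ ["action_oriented"] else patterns
  let technical_events := ["api_docs", "technical_specs", "integration_guide", "docs_view"]
  let technical_count : Int := event_types.foldl (fun acc e => if technical_events.contains e then acc + 1 else acc) 0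
  let patterns := if technical_count ≥ 2 then patterns ++ ["technical_evaluator"] else patterns
  let comparison_events := ["competitor_comparison", "vs_page", "calculator"]
  let comparison_count : Int := event_types.foldl (fun acc e => if comparison_events.contains e then acc + 1 else acc) 0
  let patterns := if comparison_count ≥ 2 then patterns ++ ["comparison_shopper"] else patterns
  let pricing_count : Int := events.foldl (fun acc e => if pricingHit e then acc + 1 else acc) 0
  let patterns := if pricing_count ≥ 2 then patterns ++ ["price_sensitive"] else patterns
  patterns

-- ===== PORT B =====
def detect_behavioral_patterns_py_alt (events : List (List (String × String))) : List String :=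
  let research := ["docs_view", "faq_view", "api_docs", "technical_specs", "download_whitepaper"]
  let action := ["form_start", "form_complete", "add_to_cart", "checkout_start", "demo_request"]
  let technical := ["api_docs", "technical_specs", "integration_guide", "docs_view"]
  let comparison := ["competitor_comparison", "vs_page", "calculator"]
  -- the single pass: n, the event-type counter, and the pricing count
  let st := events.foldl
    (fun (st : Int × PySem.Dict String Int × Int) e =>
      (st.1 + 1,
       st.2.1.insert (pyGetEventType e) (st.2.1.getD (pyGetEventType e) 0 + 1),
       if pricingHit e then st.2.2 + 1 else st.2.2))
    (0, PySem.Dict.empty, 0)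
  let n := st.1
  let counts := st.2.1
  let pricing := st.2.2
  let patterns : List String :=
    if n > 15 then ["highly_engaged"]
    else if n > 8 then ["engaged"]
    else if n > 4 then ["exploring"]
    else []
  let patterns := if (research.map (fun t => counts.getD t 0)).sum ≥ 3 then patterns ++ ["researcher"] else patterns
  let patterns := if (action.map (fun t => counts.getD t 0)).sum ≥ 2 then patterns ++ ["action_oriented"] else patterns
  let patterns := if (technical.map (fun t => counts.getD t 0)).sum ≥ 2 then patterns ++ ["technical_evaluator"] else patterns
  let patterns := if (comparison.map (fun t => counts.getD t 0)).sum ≥ 2 then patterns ++ ["comparison_shopper"] else patterns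
  let patterns := if pricing ≥ 2 then patterns ++ ["price_sensitive"] else patterns
  patterns

-- ===== PRECONDITION & SPEC =====
def Spec_detect_behavioral_patterns_py (events : List (List (String × String))) (out : List String) : Prop := out = detect_behavioral_patterns_py_alt events
instance (events : List (List (String × String))) (out : List String) : Decidable (Spec_detect_behavioral_patterns_py events out) := by unfold Spec_detect_behavioral_patterns_py; infer_instance

-- ===== CLAIM (what is proved, stated in full; the proofs are below) =====
def Claim_equal_detect_behavioral_patterns_py : Prop := ∀ (events : List (List (String × String))), Dom_detect_behavioral_patterns_py events → Spec_detect_behavioral_patterns_py events (detect_behavioral_patterns_py events)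

-- ===== LEMMAS AND PROOFS =====

-- B's single fold over a triple is three independent folds.
lemma pv_fold_triple (events : List (List (String × String))) (n0 : Int)
    (d0 : PySem.Dict String Int) (p0 : Int) :
    events.foldl
      (fun (st : Int × PySem.Dict String Int × Int) e =>
        (st.1 + 1,
         st.2.1.insert (pyGetEventType e) (st.2.1.getD (pyGetEventType e) 0 + 1),
         if pricingHit e then st.2.2 + 1 else st.2.2))
      (n0, d0, p0)
    = (n0 + events.length,
       events.foldl (fun d e => d.insert (pyGetEventType e) (d.getD (pyGetEventType e) 0 + 1)) d0,
       events.foldl (fun p e => if pricingHit e then p + 1 else p) p0) := by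
  induction events generalizing n0 d0 p0 with
  | nil => simp
  | cons e es ih =>
    simp only [List.foldl_cons, ih, List.length_cons]
    refine congrArg (fun m => (m, _, _)) ?_
    push_cast
    ring

-- Under Nodup, summing (if x = t then 1 else 0) over C counts x's membership once.
lemma pv_sum_ite_mem (C : List String) (x : String) (h : C.Nodup) :
    (C.map (fun t => if x = t then (1 : Int) else 0)).sum = if x ∈ C then 1 else 0 := by
  induction C with
  | nil => simp
  | cons c C ih =>
    rcases List.nodup_cons.mp h with ⟨hc, hC⟩
    simp only [List.map_cons, List.sum_cons, ih hC, List.mem_cons]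
    by_cases hx : x = c
    · subst hx
      simp [hc]
    · simp [hx]

-- Sum of per-type counts over a Nodup category list = count of elements lying in the list.
lemma pv_sum_count_eq_countP (C : List String) (h : C.Nodup) (xs : List String) :
    (C.map (fun t => (xs.count t : Int))).sum = (xs.countP (fun t => C.contains t) : Int) := by
  induction xs with
  | nil => simp
  | cons x xs ih =>
    have hcnt : ∀ t : String, ((x :: xs).count t : Int) = (xs.count t : Int) + (if x = t then (1:Int) else 0) := by
      intro t
      rw [List.count_cons]
      push_cast
      by_cases h : x = t
      · simp [h]
      · have h2 : ¬ t = x := fun e => h e.symm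
        simp [h, h2]
    calc (C.map (fun t => ((x :: xs).count t : Int))).sum
        = (C.map (fun t => (xs.count t : Int) + (if x = t then (1:Int) else 0))).sum := by
          exact congrArg List.sum (List.map_congr_left (fun t _ => hcnt t))
      _ = (C.map (fun t => (xs.count t : Int))).sum + (C.map (fun t => if x = t then (1:Int) else 0)).sum := by
          rw [← List.sum_map_add]
      _ = (xs.countP (fun t => C.contains t) : Int) + (if x ∈ C then 1 else 0) := by
          rw [ih, pv_sum_ite_mem C x h]
      _ = ((x :: xs).countP (fun t => C.contains t) : Int) := by
          rw [List.countP_cons]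
          push_cast
          by_cases hm : x ∈ C <;> simp [List.contains_iff_mem, hm]

-- the counter lookup of B = the per-type count of A's event_types list
lemma pv_counter_getD (events : List (List (String × String))) (t : String) :
    (events.foldl (fun d e => d.insert (pyGetEventType e) (d.getD (pyGetEventType e) 0 + 1))
        (PySem.Dict.empty : PySem.Dict String Int)).getD t 0
      = ((events.map pyGetEventType).count t : Int) := by
  rw [← List.foldl_map (f := pyGetEventType)
        (g := fun (d : PySem.Dict String Int) x => d.insert x (d.getD x 0 + 1))]
  rw [PySem.Dict.getD_foldl_insert_add_one]
  simp

-- ===== VERDICT (by name: the statement is the Claim_ definition above) =====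
theorem detect_behavioral_patterns_py_spec : Claim_equal_detect_behavioral_patterns_py := by
  intro events _
  unfold Spec_detect_behavioral_patterns_py
  unfold detect_behavioral_patterns_py detect_behavioral_patterns_py_alt
  rw [pv_fold_triple]
  simp only [pv_counter_getD]
  rw [pv_sum_count_eq_countP _ (by decide) (events.map pyGetEventType),
      pv_sum_count_eq_countP _ (by decide) (events.map pyGetEventType),
      pv_sum_count_eq_countP _ (by decide) (events.map pyGetEventType),
      pv_sum_count_eq_countP _ (by decide) (events.map pyGetEventType)]
  simp only [PySem.List.foldl_if_add_one, zero_add, List.nil_append]
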